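-- pv_equiv track=rewrite | github.com/climao/aed-resources | projects/Graphs/bfs.py | bfs
-- ===== SOURCE A (Python) =====
-- def bfs(graph, start):
--     """
--     Algoritmo Breadth-First-Search (BFS)
--
--     :param graph: grafo na forma de uma matriz de adjacencias. Cada posição (x,y) é 1 se existir uma aresta entre os 2.
--     :param start: the node to start from.
--     :return: array containing the shortest distances from the given start node to each other node
--     """
--     # Uma fila para guardar nós a visitar. Inicialmente o nó inicial.
--     queue = [start]
--
--     # Conjunto de nós visitados. Inicialmente "start". O(1)
--     visited = set((start,))
--
--     # Não são necessárias outras inicializaçoes, pois BFS visita cada nó exatamente uma vez.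
--     visits = []
--
--     # Enquanto existirem nós na fila...
--     while len(queue) > 0:
--         node = queue.pop(0)
--         for i in range(len(graph[node])):
--             if graph[node][i] and i not in visited:
--                 # ...marcar como visitado e colocar na fila.
--                 visited.add(i)
--                 queue.append(i)
--
--     return visited
-- ===== SOURCE B (Python) =====
-- def bfs(graph, start):
--     # Two-phase reachability: first compress the adjacency matrix into
--     # adjacency lists, then traverse by sliding a cursor over the growing
--     # visit-order list itself -- no queue object, no pop(0), and no per-cell
--     # truthiness test during the traversal (only real edges are scanned).
--     adj = [[i for i, w in enumerate(row) if w] for row in graph]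
--     seen = {start}
--     order = [start]
--     k = 0
--     while k < len(order):
--         for i in adj[order[k]]:
--             if i not in seen:
--                 seen.add(i)
--                 order.append(i)
--         k += 1
--     return seen
-- ===== Notes on version B (the rewrite author's own statement) =====
-- stated objective: alternative
-- what changed: B first compresses the adjacency matrix into adjacency lists in a separate pass, then traverses with a cursor sliding over the growing visit-order list itself: the FIFO queue with its repeated pop(0) disappears, and the traversal scans only real edges instead of testing every matrix cell; the visited set (and its insertion order) is identical.
-- outside the precondition, e.g. on bfs([[0], [0, 0, 1]], 0): A returns {0}, B returns {0}
import Mathlib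
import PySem

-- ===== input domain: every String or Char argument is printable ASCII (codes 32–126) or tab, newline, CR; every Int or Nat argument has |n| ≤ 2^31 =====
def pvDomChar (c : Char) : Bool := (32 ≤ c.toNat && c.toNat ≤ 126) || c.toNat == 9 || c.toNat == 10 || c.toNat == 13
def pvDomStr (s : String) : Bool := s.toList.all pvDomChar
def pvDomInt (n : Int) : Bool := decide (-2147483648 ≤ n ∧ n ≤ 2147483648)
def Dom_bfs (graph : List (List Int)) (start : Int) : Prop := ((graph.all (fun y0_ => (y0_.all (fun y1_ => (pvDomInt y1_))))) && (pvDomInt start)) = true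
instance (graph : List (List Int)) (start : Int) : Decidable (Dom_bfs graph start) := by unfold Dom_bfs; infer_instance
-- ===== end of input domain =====

-- B precomputes adjacency lists from the matrix and then traverses with a cursor over
-- the growing visit-order list (no FIFO queue, no pop(0)); the returned visited set —
-- and its insertion order — is proved identical to A's.

-- ===== PORT A =====
-- Termination infrastructure, cited by the loops' decreasing_by: the nodes one row scan
-- newly discovers (pvNews, with its index-list twin pvNewsB used by B's port), the largest
-- row length, and counts of undiscovered values.
def pvNews : List (Int × Int) → List Int → List Int
  | [], _ => []
  | (i, w) :: t, v => if w ≠ 0 ∧ i ∉ v then i :: pvNews t (v ++ [i]) else pvNews t v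

def pvMaxRow (graph : List (List Int)) : Nat :=
  graph.foldl (fun acc r => max acc r.length) 0

def pvFresh (bound : Nat) (v : List Int) : Nat :=
  (List.range bound).countP (fun i => !(v.contains ((i : Nat) : Int)))

lemma pvNews_nodup_fresh : ∀ (l : List (Int × Int)) (v : List Int),
    (pvNews l v).Nodup ∧ ∀ x ∈ pvNews l v, x ∉ v ∧ ∃ p ∈ l, x = p.1 := by
  intro l
  induction l with
  | nil => intro v; simp [pvNews]
  | cons hd t ih =>
    intro v
    obtain ⟨i, w⟩ := hd
    simp only [pvNews]
    split
    · rename_i hg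
      obtain ⟨hnd, hf⟩ := ih (v ++ [i])
      refine ⟨?_, ?_⟩
      · exact List.nodup_cons.2 ⟨fun hmem => by simpa using (hf i hmem).1, hnd⟩
      · intro x hx
        rcases List.mem_cons.1 hx with heq | hx'
        · subst heq; exact ⟨hg.2, (x, w), by simp, rfl⟩
        · obtain ⟨hxv, p, hp, rfl⟩ := hf x hx'
          exact ⟨fun hc => hxv (by simp [hc]), p, List.mem_cons_of_mem _ hp, rfl⟩
    · obtain ⟨hnd, hf⟩ := ih v
      refine ⟨hnd, fun x hx => ?_⟩
      obtain ⟨hxv, p, hp, rfl⟩ := hf x hx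
      exact ⟨hxv, p, List.mem_cons_of_mem _ hp, rfl⟩

lemma mem_enumerate_bounds : ∀ (xs : List Int) (k : Int) (p : Int × Int),
    p ∈ PySem.List.enumerate xs k → k ≤ p.1 ∧ p.1 < k + xs.length := by
  intro xs
  induction xs with
  | nil => intro k p hp; simp [PySem.List.enumerate] at hp
  | cons x t ih =>
    intro k p hp
    simp only [PySem.List.enumerate, List.mem_cons] at hp
    rcases hp with rfl | hp
    · simp only [List.length_cons]; push_cast; simp
    · have := ih (k + 1) p hp
      simp only [List.length_cons]
      push_cast at *
      omega

lemma pvFresh_succ (b : Nat) (v : List Int) :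
    pvFresh (b + 1) v = pvFresh b v + (if (b : Int) ∈ v then 0 else 1) := by
  unfold pvFresh
  rw [List.range_succ, List.countP_append]
  by_cases h : (b : Int) ∈ v <;> simp [h]

lemma pvFresh_single (v : List Int) (i : Nat) : ∀ (bound : Nat), i < bound → (i : Int) ∉ v →
    pvFresh bound (v ++ [(i : Int)]) + 1 = pvFresh bound v := by
  intro bound
  induction bound with
  | zero => omega
  | succ b ih =>
    intro hib hiv
    rw [pvFresh_succ, pvFresh_succ]
    by_cases heq : i = b
    · subst heq
      have h1 : (i : Int) ∈ v ++ [(i : Int)] := by simp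
      have h2 : pvFresh i (v ++ [(i : Int)]) = pvFresh i v := by
        unfold pvFresh
        apply List.countP_congr
        intro a ha
        have : a < i := List.mem_range.1 ha
        have : ((a : Nat) : Int) ≠ (i : Int) := by exact_mod_cast Nat.ne_of_lt this
        simp [this]
      simp [h1, hiv, h2]
    · have hib' : i < b := by omega
      have h1 : ((b : Int) ∈ v ++ [(i : Int)]) ↔ ((b : Int) ∈ v) := by
        have : ((b : Nat) : Int) ≠ (i : Int) := by
          intro h; exact heq (by exact_mod_cast h.symm)
        simp [this]
      rw [← ih hib' hiv]
      by_cases hb : (b : Int) ∈ v <;> simp [hb, h1]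

lemma pvFresh_append_list : ∀ (d v : List Int) (bound : Nat), d.Nodup →
    (∀ x ∈ d, x ∉ v) → (∀ x ∈ d, ∃ i : Nat, i < bound ∧ x = (i : Int)) →
    pvFresh bound (v ++ d) + d.length = pvFresh bound v := by
  intro d
  induction d with
  | nil => intro v bound _ _ _; simp
  | cons x d' ih =>
    intro v bound hnd hf hb
    obtain ⟨i, hib, rfl⟩ := hb _ (List.mem_cons_self ..)
    have hx : (i : Int) ∉ v := hf _ (List.mem_cons_self ..)
    have hstep := pvFresh_single v i bound hib hx
    have hf' : ∀ y ∈ d', y ∉ v ++ [(i : Int)] := by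
      intro y hy
      simp only [List.mem_append, List.mem_singleton]
      rintro (h | h)
      · exact hf y (List.mem_cons_of_mem _ hy) h
      · exact (List.nodup_cons.1 hnd).1 (h ▸ hy)
    have := ih (v ++ [(i : Int)]) bound (List.nodup_cons.1 hnd).2 hf'
      (fun y hy => hb y (List.mem_cons_of_mem _ hy))
    rw [List.append_cons]
    simp only [List.length_cons]
    omega

lemma pyGet?_mem (graph : List (List Int)) (node : Int) (row : List Int)
    (h : PySem.List.pyGet? graph node = some row) : row ∈ graph := by
  unfold PySem.List.pyGet? at h
  rw [Option.bind_eq_some_iff] at h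
  obtain ⟨k, _, hk⟩ := h
  exact List.mem_of_getElem? hk

lemma row_le_maxRow (graph : List (List Int)) (row : List Int) (h : row ∈ graph) :
    row.length ≤ pvMaxRow graph :=
  (PySem.List.le_foldl_max_nat graph List.length 0).2 row h

-- inner loop of A: `for i in range(len(graph[node])): if graph[node][i] and i not in visited:
-- visited.add(i); queue.append(i)` — state is (visited, queue); `graph[node][i]` with i in
-- range is total, ported as pyGetD (pyGet? is `some` there).
def bfsScanA (row : List Int) (st : List Int × List Int) : List Int × List Int :=
  (PySem.List.pyRange 0 (PySem.List.len row)).foldl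
    (fun s i =>
      if PySem.List.pyGetD row i 0 ≠ 0 ∧ i ∉ s.1 then (PySem.Set.add s.1 i, s.2 ++ [i]) else s)
    st

lemma scanA_aux (full : List Int) : ∀ (t : List Int) (k : Nat), full.drop k = t →
    ∀ (v acc : List Int),
    ((List.range' k t.length).map (fun j => ((j : Nat) : Int))).foldl
      (fun s i =>
        if PySem.List.pyGetD full i 0 ≠ 0 ∧ i ∉ s.1 then (PySem.Set.add s.1 i, s.2 ++ [i]) else s)
      (v, acc)
      = (v ++ pvNews (PySem.List.enumerate t (k : Int)) v,
         acc ++ pvNews (PySem.List.enumerate t (k : Int)) v) := by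
  intro t
  induction t with
  | nil => intro k _ v acc; simp [PySem.List.enumerate, pvNews]
  | cons w t' ih =>
    intro k hdrop v acc
    have hget : PySem.List.pyGetD full ((k : Nat) : Int) 0 = w := by
      rw [PySem.List.pyGetD_natCast]
      have h1 : full[k]? = some w := by
        rw [← List.head?_drop, hdrop]; rfl
      simp [List.getD, h1]
    have hdrop' : full.drop (k + 1) = t' := by
      have : (full.drop k).drop 1 = full.drop (k + 1) := by rw [List.drop_drop]
      rw [← this, hdrop]; rfl
    have henum : PySem.List.enumerate (w :: t') (k : Int)
        = ((k : Int), w) :: PySem.List.enumerate t' ((k : Int) + 1) := by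
      simp [PySem.List.enumerate]
    rw [henum]
    simp only [List.length_cons, List.range'_succ, List.map_cons, List.foldl_cons, pvNews, hget]
    have hcast : ((k : Int) + 1) = (((k + 1 : Nat)) : Int) := by push_cast; ring
    split
    · rename_i h
      rw [PySem.Set.add_of_not_mem h.2]
      rw [hcast, ih (k + 1) hdrop' (v ++ [(k : Int)]) (acc ++ [(k : Int)])]
      simp
    · rw [hcast, ih (k + 1) hdrop' v acc]

lemma bfsScanA_spec (row v acc : List Int) :
    bfsScanA row (v, acc) = (v ++ pvNews (PySem.List.enumerate row) v,
                             acc ++ pvNews (PySem.List.enumerate row) v) := by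
  unfold bfsScanA
  have hlen : PySem.List.len row = ((row.length : Nat) : Int) := rfl
  rw [hlen, PySem.List.pyRange_zero_natCast, List.range_eq_range']
  exact scanA_aux row row 0 rfl v acc

-- the new nodes of one row scan stay below pvMaxRow (used by bfsLoopA's decreasing_by)
lemma pvNews_bounded (graph : List (List Int)) (node : Int) (row : List Int) (v : List Int)
    (hrow : PySem.List.pyGet? graph node = some row) :
    ∀ x ∈ pvNews (PySem.List.enumerate row) v, ∃ i : Nat, i < pvMaxRow graph ∧ x = (i : Int) := by
  intro x hx
  obtain ⟨hxv, p, hp, rfl⟩ := (pvNews_nodup_fresh (PySem.List.enumerate row) v).2 x hx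
  have hb := mem_enumerate_bounds row 0 p hp
  have hr := row_le_maxRow graph row (pyGet?_mem graph node row hrow)
  refine ⟨p.1.toNat, by omega, (Int.toNat_of_nonneg (by omega)).symm⟩

-- outer while-loop of A, one queue element per step
def bfsLoopA (graph : List (List Int)) (v : List Int) (q : List Int) : List Int :=
  match q with
  | [] => v
  | node :: rest =>
    match hrow : PySem.List.pyGet? graph node with
    | none => v  -- Python raises IndexError on graph[node] here; outside Pre_bfs
    | some row =>
      bfsLoopA graph (bfsScanA row (v, rest)).1 (bfsScanA row (v, rest)).2
termination_by 2 * pvFresh (pvMaxRow graph) v + q.length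
decreasing_by
  rw [bfsScanA_spec]
  obtain ⟨hnd, hf⟩ := pvNews_nodup_fresh (PySem.List.enumerate row) v
  have hkey := pvFresh_append_list (pvNews (PySem.List.enumerate row) v) v (pvMaxRow graph)
    hnd (fun x hx => (hf x hx).1) (pvNews_bounded graph node row v hrow)
  simp only [List.length_append, List.length_cons]
  omega

def bfs (graph : List (List Int)) (start : Int) : List Int :=
  bfsLoopA graph (PySem.Set.ofList [start]) [start]

-- ===== PORT B =====
-- pvNewsB: the nodes one adjacency-list scan newly discovers (B's twin of pvNews)
def pvNewsB : List Int → List Int → List Int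
  | [], _ => []
  | i :: t, v => if i ∉ v then i :: pvNewsB t (v ++ [i]) else pvNewsB t v

lemma pvNewsB_nodup_fresh : ∀ (l : List Int) (v : List Int),
    (pvNewsB l v).Nodup ∧ ∀ x ∈ pvNewsB l v, x ∉ v ∧ x ∈ l := by
  intro l
  induction l with
  | nil => intro v; simp [pvNewsB]
  | cons i t ih =>
    intro v
    simp only [pvNewsB]
    split
    · rename_i hg
      obtain ⟨hnd, hf⟩ := ih (v ++ [i])
      refine ⟨?_, ?_⟩
      · exact List.nodup_cons.2 ⟨fun hmem => by simpa using (hf i hmem).1, hnd⟩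
      · intro x hx
        rcases List.mem_cons.1 hx with heq | hx'
        · subst heq; exact ⟨hg, List.mem_cons_self ..⟩
        · obtain ⟨hxv, hxl⟩ := hf x hx'
          exact ⟨fun hc => hxv (by simp [hc]), List.mem_cons_of_mem _ hxl⟩
    · obtain ⟨hnd, hf⟩ := ih v
      refine ⟨hnd, fun x hx => ?_⟩
      obtain ⟨hxv, hxl⟩ := hf x hx
      exact ⟨hxv, List.mem_cons_of_mem _ hxl⟩

-- count of values in a fixed pool not yet discovered (B's termination measure)
def pvFreshE (pool v : List Int) : Nat := (pool.filter (fun x => !v.contains x)).length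

lemma pvFreshE_single (pool : List Int) (hp : pool.Nodup) (x : Int) (hx : x ∈ pool)
    (v : List Int) (hxv : x ∉ v) : pvFreshE pool (v ++ [x]) + 1 = pvFreshE pool v := by
  have hpred : pool.filter (fun y => !(v ++ [x]).contains y)
      = (pool.filter (fun y => !v.contains y)).filter (fun y => y != x) := by
    rw [List.filter_filter]
    apply List.filter_congr
    intro y _
    by_cases h1 : y ∈ v <;> by_cases h2 : y = x <;> simp [h1, h2]
  have hL : (pool.filter (fun y => !v.contains y)).Nodup := hp.filter _
  have hxL : x ∈ pool.filter (fun y => !v.contains y) := by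
    simp [List.mem_filter, hx, hxv]
  unfold pvFreshE
  rw [hpred, ← hL.erase_eq_filter x, List.length_erase_of_mem hxL]
  have : (pool.filter (fun y => !v.contains y)).length ≠ 0 := by
    intro h0
    rw [List.length_eq_zero_iff] at h0
    rw [h0] at hxL
    simp at hxL
  omega

lemma pvFreshE_append_list (pool : List Int) (hp : pool.Nodup) : ∀ (d v : List Int), d.Nodup →
    (∀ x ∈ d, x ∉ v) → (∀ x ∈ d, x ∈ pool) →
    pvFreshE pool (v ++ d) + d.length = pvFreshE pool v := by
  intro d
  induction d with
  | nil => intro v _ _ _; simp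
  | cons x d' ih =>
    intro v hnd hf hb
    have hx : x ∉ v := hf _ (List.mem_cons_self ..)
    have hstep := pvFreshE_single pool hp x (hb _ (List.mem_cons_self ..)) v hx
    have hf' : ∀ y ∈ d', y ∉ v ++ [x] := by
      intro y hy
      simp only [List.mem_append, List.mem_singleton]
      rintro (h | h)
      · exact hf y (List.mem_cons_of_mem _ hy) h
      · exact (List.nodup_cons.1 hnd).1 (h ▸ hy)
    have := ih (v ++ [x]) (List.nodup_cons.1 hnd).2 hf'
      (fun y hy => hb y (List.mem_cons_of_mem _ hy))
    rw [List.append_cons]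
    simp only [List.length_cons]
    omega

-- `adj = [[i for i, w in enumerate(row) if w] for row in graph]`
def pvAdjOf (graph : List (List Int)) : List (List Int) :=
  graph.map (fun row => ((PySem.List.enumerate row).filter (fun p => p.2 ≠ 0)).map Prod.fst)

-- inner loop of B: `for i in adj[order[k]]: if i not in seen: seen.add(i); order.append(i)`
def bfsScanC (nbrs : List Int) (st : List Int × List Int) : List Int × List Int :=
  nbrs.foldl
    (fun s i => if i ∉ s.1 then (PySem.Set.add s.1 i, s.2 ++ [i]) else s)
    st

lemma bfsScanC_spec : ∀ (nbrs v acc : List Int),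
    bfsScanC nbrs (v, acc) = (v ++ pvNewsB nbrs v, acc ++ pvNewsB nbrs v) := by
  intro nbrs
  induction nbrs with
  | nil => intro v acc; simp [bfsScanC, pvNewsB]
  | cons i t ih =>
    intro v acc
    simp only [bfsScanC, List.foldl_cons, pvNewsB] at *
    split
    · rename_i h
      rw [PySem.Set.add_of_not_mem h, ih]
      simp
    · rw [ih]

-- outer while-loop of B: `while k < len(order): … k += 1` — the cursor k slides over the
-- growing order list; `order[k]` is in range by the loop guard.
def bfsLoopC (adj : List (List Int)) (seen order : List Int) (k : Nat) : List Int :=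
  if hk : k < order.length then
    match hrow : PySem.List.pyGet? adj order[k] with
    | none => seen  -- Python raises IndexError on adj[order[k]] here; outside Pre_bfs
    | some nbrs =>
      bfsLoopC adj (bfsScanC nbrs (seen, order)).1 (bfsScanC nbrs (seen, order)).2 (k + 1)
  else seen
termination_by 2 * pvFreshE (PySem.List.dedup adj.flatten) seen + (order.length - k)
decreasing_by
  rw [bfsScanC_spec]
  obtain ⟨hnd, hf⟩ := pvNewsB_nodup_fresh nbrs seen
  have hmem : ∀ x ∈ pvNewsB nbrs seen, x ∈ PySem.List.dedup adj.flatten := by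
    intro x hx
    have hxn : x ∈ nbrs := (hf x hx).2
    have : x ∈ adj.flatten := List.mem_flatten.2 ⟨nbrs, pyGet?_mem adj _ nbrs hrow, hxn⟩
    simp [this]
  have hkey := pvFreshE_append_list (PySem.List.dedup adj.flatten)
    (PySem.List.nodup_dedup adj.flatten) (pvNewsB nbrs seen) seen hnd
    (fun x hx => (hf x hx).1) hmem
  simp only [List.length_append]
  omega

def bfs_alt (graph : List (List Int)) (start : Int) : List Int :=
  bfsLoopC (pvAdjOf graph) (PySem.Set.ofList [start]) [start] 0

-- ===== PRECONDITION & SPEC =====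
-- Pre_bfs excludes exactly the inputs where Python's graph[...] indexing raises IndexError
-- (start outside [-len(graph), len(graph)), or a dequeued neighbour out of range); to stay
-- closed-form it requires EVERY truthy entry to point inside the graph, which also excludes
-- some inputs A returns on (an out-of-range truthy entry in a row BFS never reaches).
def Pre_bfs (graph : List (List Int)) (start : Int) : Prop :=
  (-(graph.length : Int) ≤ start ∧ start < (graph.length : Int)) ∧
  (graph.all (fun row =>
    (List.range row.length).all (fun i => row.getD i 0 == 0 || decide (i < graph.length)))) = true
instance (graph : List (List Int)) (start : Int) : Decidable (Pre_bfs graph start) := by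
  unfold Pre_bfs; infer_instance

def pvWitness_bfs : List (List Int) × Int := ([[0, 1], [1, 0]], 0)

def Spec_bfs (graph : List (List Int)) (start : Int) (out : List Int) : Prop :=
  out = bfs_alt graph start
instance (graph : List (List Int)) (start : Int) (out : List Int) :
    Decidable (Spec_bfs graph start out) := by unfold Spec_bfs; infer_instance

-- ===== CLAIM (what is proved, stated in full; the proofs are below) =====
def Claim_equal_bfs : Prop := ∀ (graph : List (List Int)) (start : Int),
  Dom_bfs graph start → Pre_bfs graph start → Spec_bfs graph start (bfs graph start)

-- ===== LEMMAS AND PROOFS =====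

-- one row: B's scan of the filtered adjacency list discovers exactly what A's cell-by-cell
-- scan of the matrix row discovers
lemma pvNewsB_filter_eq : ∀ (l : List (Int × Int)) (v : List Int),
    pvNewsB ((l.filter (fun p => p.2 ≠ 0)).map Prod.fst) v = pvNews l v := by
  intro l
  induction l with
  | nil => intro v; simp [pvNewsB, pvNews]
  | cons hd t ih =>
    intro v
    obtain ⟨i, w⟩ := hd
    by_cases hw : w = 0
    · rw [List.filter_cons, if_neg (by simp [hw])]
      simp only [pvNews]
      rw [if_neg (by simp [hw])]
      exact ih v
    · rw [List.filter_cons, if_pos (by simp [hw])]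
      simp only [List.map_cons, pvNewsB, pvNews]
      by_cases hv : i ∈ v
      · rw [if_neg (by simpa using hv), if_neg (by simp [hv])]
        exact ih v
      · rw [if_pos (by simpa using hv), if_pos ⟨hw, hv⟩]
        rw [ih (v ++ [i])]

lemma pyGet?_map_filterRow (graph : List (List Int)) (n : Int) :
    PySem.List.pyGet? (pvAdjOf graph) n
      = (PySem.List.pyGet? graph n).map
          (fun row => ((PySem.List.enumerate row).filter (fun p => p.2 ≠ 0)).map Prod.fst) := by
  simp [pvAdjOf, PySem.List.pyGet?, PySem.List.pyIdx?]

-- plain (non-dependent) one-step unfoldings of the two loops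
lemma bfsLoopA_step (graph : List (List Int)) (v : List Int) (node : Int) (rest : List Int) :
    bfsLoopA graph v (node :: rest) =
      match PySem.List.pyGet? graph node with
      | none => v
      | some row => bfsLoopA graph (bfsScanA row (v, rest)).1 (bfsScanA row (v, rest)).2 := by
  rw [bfsLoopA]
  cases hg : PySem.List.pyGet? graph node <;> rfl

lemma bfsLoopC_stop (adj : List (List Int)) (seen order : List Int) (k : Nat)
    (hk : ¬ k < order.length) : bfsLoopC adj seen order k = seen := by
  rw [bfsLoopC.eq_def, dif_neg hk]

lemma bfsLoopC_step (adj : List (List Int)) (seen order : List Int) (k : Nat)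
    (hk : k < order.length) :
    bfsLoopC adj seen order k =
      match PySem.List.pyGet? adj (order[k]'hk) with
      | none => seen
      | some nbrs =>
        bfsLoopC adj (bfsScanC nbrs (seen, order)).1 (bfsScanC nbrs (seen, order)).2 (k + 1) := by
  rw [bfsLoopC.eq_def, dif_pos hk]
  cases hg : PySem.List.pyGet? adj (order[k]'hk) <;> rfl

-- A's queue run against B's cursor run: with v = pre ++ q (pre = the already-processed
-- prefix), A's remaining queue is exactly what B's cursor at position pre.length still
-- has ahead of it in the visit-order list.
lemma loopAC (graph : List (List Int)) : ∀ (v q : List Int), ∀ pre, v = pre ++ q →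
    bfsLoopA graph v q = bfsLoopC (pvAdjOf graph) v v pre.length := by
  intro v q
  induction v, q using bfsLoopA.induct graph with
  | case1 v =>
    intro pre hpre
    rw [bfsLoopA, bfsLoopC_stop _ _ _ _ (by simp [hpre])]
  | case2 v node rest hrow =>
    intro pre hpre
    have hk : pre.length < v.length := by simp [hpre]
    have hnode : v[pre.length]'hk = node := by
      subst hpre
      rw [List.getElem_append_right (Nat.le_refl _)]
      simp
    rw [bfsLoopA_step, hrow, bfsLoopC_step _ _ _ _ hk, hnode, pyGet?_map_filterRow, hrow]
    rfl
  | case3 v node rest row hrow ih =>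
    intro pre hpre
    have hk : pre.length < v.length := by simp [hpre]
    have hnode : v[pre.length]'hk = node := by
      subst hpre
      rw [List.getElem_append_right (Nat.le_refl _)]
      simp
    have hd := bfsScanA_spec row v rest
    rw [bfsLoopA_step, hrow, bfsLoopC_step _ _ _ _ hk, hnode, pyGet?_map_filterRow, hrow]
    simp only [Option.map_some]
    rw [hd, bfsScanC_spec, pvNewsB_filter_eq]
    simp only
    have hih := ih (pre ++ [node]) (by
      rw [hd]
      simp [hpre, List.append_assoc])
    rw [hd] at hih
    simp only at hih
    simpa [List.length_append] using hih

-- ===== VERDICT (by name: the statement is the Claim_ definition above) =====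
theorem bfs_spec : Claim_equal_bfs := by
  intro graph start _ _
  unfold Spec_bfs bfs bfs_alt
  exact loopAC graph [start] [start] [] rfl
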